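-- pv_equiv track=rewrite | github.com/starfuryone/agoraiq-signals | scripts/rewrite_nav.py | render_nav
-- ===== SOURCE A (Python) =====
-- NAV_TEMPLATE = """<nav>
--     <a href="signals.html"{ACTIVE_signals}>Signals</a>
--     <a href="signals-feed.html"{ACTIVE_signals_feed}>Feed</a>
--     <a href="scanner.html"{ACTIVE_scanner}>Scanner</a>
--     <a href="chart.html"{ACTIVE_chart}>Chart</a>
--     <a href="track.html"{ACTIVE_track}>Track</a>
--     <a href="watchlist.html"{ACTIVE_watchlist}>Watchlist</a>
--     <a href="providers.html"{ACTIVE_providers}>Providers</a>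
--     <a href="https://signals.agoraiq.net">Calls</a>
--     <a href="pricing.html"{ACTIVE_pricing}>Pricing</a>
--     <a href="help.html"{ACTIVE_help}>Help</a>
--     <a href="#" onclick="localStorage.removeItem('iq_token');window.location.href='/login.html'" style="color:var(--red)">Sign Out</a>
--   </nav>"""
--
-- ACTIVE_MAP = {
--     "signals.html": "signals",
--     "signals-mobile.html": "signals",
--     "signals-feed.html": "signals_feed",
--     "scanner.html": "scanner",
--     "scanner-mobile.html": "scanner",
--     "chart.html": "chart",
--     "chart-mobile.html": "chart",
--     "track.html": "track",
--     "track-mobile.html": "track",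
--     "watchlist.html": "watchlist",
--     "providers.html": "providers",
--     "pricing.html": "pricing",
--     "help.html": "help",
-- }
--
-- def render_nav(filename: str) -> str:
--     keys = ["signals", "signals_feed", "scanner", "chart", "track", "watchlist",
--             "providers", "pricing", "help"]
--     sub = {f"ACTIVE_{k}": "" for k in keys}
--     active_key = ACTIVE_MAP.get(filename)
--     if active_key:
--         sub[f"ACTIVE_{active_key}"] = ' class="active"'
--     out = NAV_TEMPLATE
--     for k, v in sub.items():
--         out = out.replace("{" + k + "}", v)
--     return out
-- ===== SOURCE B (Python) =====
-- ACTIVE_MAP = {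
--     "signals.html": "signals",
--     "signals-mobile.html": "signals",
--     "signals-feed.html": "signals_feed",
--     "scanner.html": "scanner",
--     "scanner-mobile.html": "scanner",
--     "chart.html": "chart",
--     "chart-mobile.html": "chart",
--     "track.html": "track",
--     "track-mobile.html": "track",
--     "watchlist.html": "watchlist",
--     "providers.html": "providers",
--     "pricing.html": "pricing",
--     "help.html": "help",
-- }
--
-- NAV_ENTRIES = [
--     ("signals.html", "Signals", "signals"),
--     ("signals-feed.html", "Feed", "signals_feed"),
--     ("scanner.html", "Scanner", "scanner"),
--     ("chart.html", "Chart", "chart"),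
--     ("track.html", "Track", "track"),
--     ("watchlist.html", "Watchlist", "watchlist"),
--     ("providers.html", "Providers", "providers"),
--     ("https://signals.agoraiq.net", "Calls", None),
--     ("pricing.html", "Pricing", "pricing"),
--     ("help.html", "Help", "help"),
-- ]
--
-- SIGNOUT_LINE = ("    <a href=\"#\" onclick=\"localStorage.removeItem('iq_token');"
--                 "window.location.href='/login.html'\" style=\"color:var(--red)\">Sign Out</a>")
--
--
-- def render_nav(filename: str) -> str:
--     active = ACTIVE_MAP.get(filename)
--     lines = ["<nav>"]
--     for href, label, key in NAV_ENTRIES: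
--         cls = ' class="active"' if key is not None and key == active else ""
--         lines.append('    <a href="' + href + '"' + cls + '>' + label + '</a>')
--     lines.append(SIGNOUT_LINE)
--     lines.append("  </nav>")
--     return "\n".join(lines)
-- ===== Notes on version B (the rewrite author's own statement) =====
-- stated objective: simpler
-- what changed: B drops the placeholder template, the substitution dict and the repeated replace passes, and instead renders the nav in one pass over an ordered (href, label, active-key) entry list, marking the entry whose key equals ACTIVE_MAP.get(filename) as active and joining the lines with newlines.
import Mathlib
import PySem

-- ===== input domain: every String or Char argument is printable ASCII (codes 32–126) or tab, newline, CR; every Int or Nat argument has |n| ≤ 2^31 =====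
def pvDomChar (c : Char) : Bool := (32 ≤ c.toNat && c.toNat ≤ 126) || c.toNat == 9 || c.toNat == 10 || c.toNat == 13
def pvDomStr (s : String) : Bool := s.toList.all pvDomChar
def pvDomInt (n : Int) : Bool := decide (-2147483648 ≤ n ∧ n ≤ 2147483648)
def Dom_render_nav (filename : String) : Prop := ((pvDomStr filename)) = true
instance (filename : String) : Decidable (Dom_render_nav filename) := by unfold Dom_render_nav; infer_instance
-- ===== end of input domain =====

-- B replaces A's placeholder template + substitution-dict + replace loop by one pass over an
-- ordered (href, label, key) entry list, emitting each <a> line directly (adding the active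
-- class where the key matches) and joining with newlines — simpler decomposition, same output.

-- ===== PORT A =====
def NAV_TEMPLATE : String := "<nav>\n    <a href=\"signals.html\"{ACTIVE_signals}>Signals</a>\n    <a href=\"signals-feed.html\"{ACTIVE_signals_feed}>Feed</a>\n    <a href=\"scanner.html\"{ACTIVE_scanner}>Scanner</a>\n    <a href=\"chart.html\"{ACTIVE_chart}>Chart</a>\n    <a href=\"track.html\"{ACTIVE_track}>Track</a>\n    <a href=\"watchlist.html\"{ACTIVE_watchlist}>Watchlist</a>\n    <a href=\"providers.html\"{ACTIVE_providers}>Providers</a>\n    <a href=\"https://signals.agoraiq.net\">Calls</a>\n    <a href=\"pricing.html\"{ACTIVE_pricing}>Pricing</a>\n    <a href=\"help.html\"{ACTIVE_help}>Help</a>\n    <a href=\"#\" onclick=\"localStorage.removeItem('iq_token');window.location.href='/login.html'\" style=\"color:var(--red)\">Sign Out</a>\n  </nav>"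

def ACTIVE_MAP : PySem.Dict String String := PySem.Dict.ofList
  [("signals.html", "signals"),
   ("signals-mobile.html", "signals"),
   ("signals-feed.html", "signals_feed"),
   ("scanner.html", "scanner"),
   ("scanner-mobile.html", "scanner"),
   ("chart.html", "chart"),
   ("chart-mobile.html", "chart"),
   ("track.html", "track"),
   ("track-mobile.html", "track"),
   ("watchlist.html", "watchlist"),
   ("providers.html", "providers"),
   ("pricing.html", "pricing"),
   ("help.html", "help")]

def renderA_keys : List String :=
  ["signals", "signals_feed", "scanner", "chart", "track", "watchlist",
   "providers", "pricing", "help"]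

-- A's dict 'sub' after the optional active-key overwrite
def renderA_sub (activeKey : Option String) : PySem.Dict String String :=
  let sub := renderA_keys.foldl (fun d k => d.insert ("ACTIVE_" ++ k) "") PySem.Dict.empty
  match activeKey with
  | some ak => if ak ≠ "" then sub.insert ("ACTIVE_" ++ ak) " class=\"active\"" else sub
  | none => sub

-- the body of A after 'active_key = ACTIVE_MAP.get(filename)': the replace loop
def renderA (activeKey : Option String) : String :=
  (renderA_sub activeKey).items.foldl
    (fun out kv => PySem.Str.replace out ("{" ++ kv.1 ++ "}") kv.2) NAV_TEMPLATE

def render_nav (filename : String) : String :=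
  renderA (PySem.Dict.get? ACTIVE_MAP filename)

-- ===== PORT B =====
def NAV_ENTRIES : List (String × String × Option String) :=
  [("signals.html", "Signals", some "signals"),
   ("signals-feed.html", "Feed", some "signals_feed"),
   ("scanner.html", "Scanner", some "scanner"),
   ("chart.html", "Chart", some "chart"),
   ("track.html", "Track", some "track"),
   ("watchlist.html", "Watchlist", some "watchlist"),
   ("providers.html", "Providers", some "providers"),
   ("https://signals.agoraiq.net", "Calls", none),
   ("pricing.html", "Pricing", some "pricing"),
   ("help.html", "Help", some "help")]

def SIGNOUT_LINE : String := "    <a href=\"#\" onclick=\"localStorage.removeItem('iq_token');window.location.href='/login.html'\" style=\"color:var(--red)\">Sign Out</a>"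

-- the body of B after 'active = ACTIVE_MAP.get(filename)'
def renderB (active : Option String) : String :=
  let lines : List String := ["<nav>"]
  let lines := NAV_ENTRIES.foldl
    (fun ls e =>
      let cls := if e.2.2.isSome ∧ e.2.2 = active then " class=\"active\"" else ""
      ls ++ ["    <a href=\"" ++ e.1 ++ "\"" ++ cls ++ ">" ++ e.2.1 ++ "</a>"])
    lines
  let lines := lines ++ [SIGNOUT_LINE]
  let lines := lines ++ ["  </nav>"]
  PySem.Str.join "\n" lines

def render_nav_alt (filename : String) : String :=
  renderB (PySem.Dict.get? ACTIVE_MAP filename)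

-- ===== PRECONDITION & SPEC =====
def Spec_render_nav (filename : String) (out : String) : Prop := out = render_nav_alt filename
instance (filename : String) (out : String) : Decidable (Spec_render_nav filename out) := by unfold Spec_render_nav; infer_instance

-- ===== CLAIM (what is proved, stated in full; the proofs are below) =====
def Claim_equal_render_nav : Prop := ∀ (filename : String), Dom_render_nav filename → Spec_render_nav filename (render_nav filename)

-- ===== LEMMAS AND PROOFS =====

def NB (l : List Char) : Bool := l.all (fun c => !(c == '{'))

def segOK (old : String) (s : Bool × String) : Bool :=
  if s.1 then
    (s.2.toList.headD ' ' == '{') && NB s.2.toList.tail &&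
      (s.2 == old || (!(List.isPrefixOf s.2.toList old.toList) && !(List.isPrefixOf old.toList s.2.toList)))
  else NB s.2.toList

def rendS (L : List (Bool × String)) : String := L.foldr (fun s acc => s.2 ++ acc) ""

def substL (old new : String) (L : List (Bool × String)) : List (Bool × String) :=
  L.map (fun s => if s.1 && (s.2 == old) then (false, new) else s)

-- go lemmas
lemma go_nil (old new : List Char) (fuel : Nat) (acc : List Char) :
    PySem.Chars.replace.go old new fuel [] acc = acc.reverse := by
  cases fuel <;> rw [PySem.Chars.replace.go.eq_def] <;> simp

lemma go_cons_no (old new : List Char) (fuel : Nat) (c : Char) (t acc : List Char)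
    (h : old.isPrefixOf (c :: t) = false) :
    PySem.Chars.replace.go old new (fuel + 1) (c :: t) acc =
      PySem.Chars.replace.go old new fuel t (c :: acc) := by
  rw [PySem.Chars.replace.go.eq_def]
  simp [h]

lemma go_match (old new : List Char) (fuel : Nat) (r acc : List Char) (h : old ≠ []) :
    PySem.Chars.replace.go old new (fuel + 1) (old ++ r) acc =
      PySem.Chars.replace.go old new fuel r (new.reverse ++ acc) := by
  obtain ⟨c, t, rfl⟩ : ∃ c t, old = c :: t := by
    cases old with | nil => exact absurd rfl h | cons c t => exact ⟨c, t, rfl⟩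
  rw [PySem.Chars.replace.go.eq_def]
  have hp : (c :: t).isPrefixOf ((c :: t) ++ r) = true :=
    List.isPrefixOf_iff_prefix.mpr (List.prefix_append _ _)
  simp [hp, List.drop_succ_cons, List.drop_left]

lemma not_prefix_append (old p r : List Char) (h1 : p.isPrefixOf old = false)
    (h2 : old.isPrefixOf p = false) : old.isPrefixOf (p ++ r) = false := by
  induction p generalizing old with
  | nil => cases old with
    | nil => simp [List.isPrefixOf] at h1
    | cons d u => simp [List.isPrefixOf] at h1
  | cons c t ih =>
    cases old with
    | nil => simp [List.isPrefixOf] at h2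
    | cons d u =>
      simp only [List.cons_append, List.isPrefixOf, Bool.and_eq_false_iff] at h1 h2 ⊢
      rcases h2 with h2 | h2
      · exact Or.inl h2
      · rcases h1 with h1 | h1
        · exact Or.inl (by simp at h1 ⊢; exact fun e => h1 e.symm)
        · exact Or.inr (ih u h1 h2)

lemma go_skip (old' new a : List Char) (ha : NB a = true) (r acc : List Char) (fuel : Nat) :
    PySem.Chars.replace.go ('{' :: old') new (a.length + fuel) (a ++ r) acc =
      PySem.Chars.replace.go ('{' :: old') new fuel r (a.reverse ++ acc) := by
  induction a generalizing acc with
  | nil => simp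
  | cons c t ih =>
    simp only [NB, List.all_cons, Bool.and_eq_true] at ha
    have hc := ha.1
    have ht : NB t = true := ha.2
    have hp : (('{' :: old') : List Char).isPrefixOf (c :: (t ++ r)) = false := by
      simp only [List.isPrefixOf, Bool.and_eq_false_iff]
      left; simp at hc ⊢; exact fun e => hc e.symm
    rw [show (c :: t).length + fuel = (t.length + fuel) + 1 by simp [List.length_cons]; omega]
    rw [List.cons_append, go_cons_no _ _ _ _ _ _ hp, ih ht]
    simp

lemma go_ph (old' new pt r acc : List Char) (fuel : Nat) (hpt : NB pt = true)
    (h1 : ('{' :: pt).isPrefixOf ('{' :: old') = false)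
    (h2 : ('{' :: old').isPrefixOf ('{' :: pt) = false) :
    PySem.Chars.replace.go ('{' :: old') new (('{' :: pt).length + fuel) (('{' :: pt) ++ r) acc =
      PySem.Chars.replace.go ('{' :: old') new fuel r (('{' :: pt).reverse ++ acc) := by
  have hp : (('{' :: old') : List Char).isPrefixOf (('{' :: pt) ++ r) = false :=
    not_prefix_append _ _ _ h1 h2
  rw [show (('{' :: pt) : List Char).length + fuel = (pt.length + fuel) + 1 by
    simp [List.length_cons]; omega]
  rw [List.cons_append] at hp ⊢
  rw [PySem.Chars.replace.go.eq_def]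
  simp only [hp]
  simp only [Bool.false_eq_true, if_false]
  rw [go_skip _ _ _ hpt]
  simp

def flatC (L : List (Bool × String)) : List Char :=
  (L.map (fun s => s.2.toList)).flatten

def segOKC (old : List Char) (s : Bool × String) : Bool :=
  if s.1 then
    (s.2.toList.headD ' ' == '{') && NB s.2.toList.tail &&
      (s.2.toList == old || (!(List.isPrefixOf s.2.toList old) && !(List.isPrefixOf old s.2.toList)))
  else NB s.2.toList

def outC (old new : List Char) (L : List (Bool × String)) : List Char :=
  (L.map (fun s => if s.1 && (s.2.toList == old) then new else s.2.toList)).flatten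

lemma go_flat (old' new : List Char) (L : List (Bool × String)) (acc : List Char) (fuel : Nat)
    (hL : L.all (segOKC ('{' :: old')) = true) (hf : (flatC L).length ≤ fuel) :
    PySem.Chars.replace.go ('{' :: old') new fuel (flatC L) acc =
      acc.reverse ++ outC ('{' :: old') new L := by
  induction L generalizing acc fuel with
  | nil => simp [flatC, outC, go_nil]
  | cons s L' ih =>
    simp only [List.all_cons, Bool.and_eq_true] at hL
    obtain ⟨hs, hL'⟩ := hL
    have hflat : flatC (s :: L') = s.2.toList ++ flatC L' := by simp [flatC]
    have hlen : (flatC (s :: L')).length = s.2.toList.length + (flatC L').length := by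
      simp [hflat]
    cases hb : s.1 with
    | false =>
      -- literal piece
      simp only [segOKC, hb, if_neg (by simp : ¬ (false = true))] at hs
      obtain ⟨f', rfl⟩ : ∃ f', fuel = s.2.toList.length + f' :=
        ⟨fuel - s.2.toList.length, by omega⟩
      rw [hflat, go_skip _ _ _ hs, ih _ _ hL' (by omega)]
      simp [outC, hb, List.append_assoc]
    | true =>
      simp [segOKC, hb, Bool.and_eq_true, Bool.or_eq_true] at hs
      obtain ⟨⟨hhead, htail⟩, halt⟩ := hs
      obtain ⟨pt, hpl⟩ : ∃ pt, s.2.toList = '{' :: pt := by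
        cases hpl : s.2.toList with
        | nil => rw [hpl] at hhead; simp at hhead
        | cons c t =>
          rw [hpl] at hhead; simp at hhead; exact ⟨t, by rw [hhead]⟩
      have htail' : NB pt = true := by rw [hpl] at htail; simpa using htail
      rcases halt with heq | hne
      · have heq' : s.2.toList = '{' :: old' := heq
        obtain ⟨f', rfl⟩ : ∃ f', fuel = f' + 1 := by
          refine ⟨fuel - 1, ?_⟩
          have h1 : 1 ≤ (flatC (s :: L')).length := by
            rw [hlen, heq']
            have : 0 < (('{' :: old') : List Char).length := by simp
            omega
          omega
        rw [hflat, heq', go_match _ _ _ _ _ (by simp),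
          ih _ _ hL' (by rw [hlen, heq'] at hf; simp at hf; omega)]
        simp [outC, hb, heq, List.append_assoc]
      · obtain ⟨hne1, hne2⟩ := hne
        obtain ⟨f', rfl⟩ : ∃ f', fuel = s.2.toList.length + f' :=
          ⟨fuel - s.2.toList.length, by omega⟩
        rw [hpl] at hne1 hne2
        rw [hflat, hpl]
        rw [go_ph _ _ _ _ _ _ htail' hne1 hne2, ih _ _ hL' (by rw [hlen, hpl] at hf; simp at hf; omega)]
        have hnb : (s.2.toList == ('{' :: old')) = false := by
          rw [hpl]; by_contra hcon
          simp only [Bool.not_eq_false, beq_iff_eq] at hcon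
          rw [hcon] at hne2
          rw [List.isPrefixOf_iff_prefix.mpr (List.prefix_refl _)] at hne2
          exact Bool.true_eq_false ▸ hne2 ▸ rfl
        have hptne : pt ≠ old' := by
          intro e; rw [hpl, e] at hnb; simp at hnb
        simp [outC, hb, hnb, hpl, hptne, List.append_assoc]

lemma toList_rendS (L : List (Bool × String)) : (rendS L).toList = flatC L := by
  induction L with
  | nil => simp [rendS, flatC]
  | cons s L' ih => simp [rendS, flatC, String.toList_append] at ih ⊢; exact ih

lemma rendS_cons (s : Bool × String) (L : List (Bool × String)) :
    rendS (s :: L) = s.2 ++ rendS L := rfl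

lemma beq_toList (s t : String) : (s == t) = (s.toList == t.toList) := by
  by_cases h : s = t
  · simp [h]
  · have h2 : s.toList ≠ t.toList := fun e => h (by
      have := congrArg String.ofList e
      simpa [String.ofList_toList] using this)
    simp [h, h2]

lemma toList_substL (old new : String) (L : List (Bool × String)) :
    (rendS (substL old new L)).toList = outC old.toList new.toList L := by
  induction L with
  | nil => simp [substL, rendS, outC]
  | cons s L' ih =>
    simp only [substL, List.map_cons, outC, List.flatten_cons] at ih ⊢
    rw [rendS_cons, String.toList_append]
    rw [show (rendS (List.map (fun s => if s.1 && (s.2 == old) then (false, new) else s) L')).toList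
        = outC old.toList new.toList L' from ih]
    rw [show outC old.toList new.toList L'
        = (List.map (fun s => if s.1 && (s.2.toList == old.toList) then new.toList else s.2.toList) L').flatten from rfl]
    congr 1
    rw [beq_toList]
    by_cases hC : (s.1 && (s.2.toList == old.toList)) = true
    · simp [hC]
    · simp only [Bool.and_eq_true, beq_iff_eq] at hC
      split <;> simp_all

theorem replace_rendS (old new : String) (L : List (Bool × String))
    (hold : ∃ t, old.toList = '{' :: t) (hL : L.all (segOKC old.toList) = true) :
    PySem.Str.replace (rendS L) old new = rendS (substL old new L) := by
  obtain ⟨t, ht⟩ := hold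
  have hne : old.toList.isEmpty = false := by rw [ht]; rfl
  rw [PySem.Str.replace, PySem.Chars.replace, if_neg (by simp [hne])]
  rw [toList_rendS, ht, go_flat _ _ _ _ _ (ht ▸ hL) (le_refl _)]
  rw [show (String.ofList (([] : List Char).reverse ++ outC ('{' :: t) new.toList L)) = String.ofList (outC old.toList new.toList L) by rw [ht]; simp]
  rw [← toList_substL, String.ofList_toList]


def msub (pairs : List (String × String)) (L : List (Bool × String)) : List (Bool × String) :=
  pairs.foldl (fun L p => substL p.1 p.2 L) L

def pairOK (p : String × String) : Prop :=
  (∃ t, p.1.toList = '{' :: t) ∧ NB p.2.toList = true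

def segOKP (pairs : List (String × String)) (s : Bool × String) : Prop :=
  if s.1 = true then
    (s.2.toList.headD ' ' == '{') = true ∧ NB s.2.toList.tail = true ∧
      ∀ p ∈ pairs, s.2 = p.1 ∨
        (s.2.toList.isPrefixOf p.1.toList = false ∧ p.1.toList.isPrefixOf s.2.toList = false)
  else NB s.2.toList = true

theorem multi_replace (pairs : List (String × String)) (L : List (Bool × String))
    (hp : ∀ p ∈ pairs, pairOK p) (hL : ∀ s ∈ L, segOKP pairs s) :
    pairs.foldl (fun out p => PySem.Str.replace out p.1 p.2) (rendS L) = rendS (msub pairs L) := by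
  induction pairs generalizing L with
  | nil => simp [msub]
  | cons p ps ih =>
    have hpk := hp p (List.mem_cons_self ..)
    have h1 : L.all (segOKC p.1.toList) = true := by
      rw [List.all_eq_true]
      intro s hs
      have hsP := hL s hs
      by_cases hb : s.1 = true
      · simp only [segOKP, if_pos hb] at hsP
        obtain ⟨hh, ht, hall⟩ := hsP
        simp only [segOKC, if_pos hb, Bool.and_eq_true, Bool.or_eq_true]
        refine ⟨⟨hh, ht⟩, ?_⟩
        rcases hall p (List.mem_cons_self ..) with he | ⟨hp1, hp2⟩
        · left; rw [he]; simp
        · right; simp [hp1, hp2]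
      · simp only [segOKP, if_neg hb] at hsP
        simp only [segOKC, if_neg hb]
        exact hsP
    rw [List.foldl_cons, replace_rendS p.1 p.2 L hpk.1 h1]
    rw [ih (substL p.1 p.2 L)
      (fun q hq => hp q (List.mem_cons_of_mem _ hq))
      ?_]
    · simp [msub]
    · intro s hs
      simp only [substL, List.mem_map] at hs
      obtain ⟨s0, hs0, rfl⟩ := hs
      have hs0P := hL s0 hs0
      by_cases hC : (s0.1 && (s0.2 == p.1)) = true
      · simp only [if_pos hC]
        simp [segOKP, hpk.2]
      · simp only [if_neg hC]
        by_cases hb : s0.1 = true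
        · simp only [segOKP, if_pos hb] at hs0P ⊢
          obtain ⟨hh, ht, hall⟩ := hs0P
          exact ⟨hh, ht, fun q hq => hall q (List.mem_cons_of_mem _ hq)⟩
        · simp only [segOKP, if_neg hb] at hs0P ⊢
          exact hs0P

lemma foldl_pairs (items : List (String × String)) (init : String) :
    items.foldl (fun out kv => PySem.Str.replace out ("{" ++ kv.1 ++ "}") kv.2) init =
      (items.map (fun kv => ("{" ++ kv.1 ++ "}", kv.2))).foldl
        (fun out p => PySem.Str.replace out p.1 p.2) init := by
  induction items generalizing init with
  | nil => rfl
  | cons kv l ih => simp [List.foldl_cons, ih]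

-- String-level Python-join expansion
lemma str_ext (s t : String) (h : s.toList = t.toList) : s = t := by
  have := congrArg String.ofList h
  simpa [String.ofList_toList] using this

lemma sjoin_singleton (sep a : String) : PySem.Str.join sep [a] = a := by
  apply str_ext
  simp [PySem.Str.toList_join, PySem.Chars.join_singleton]

lemma sjoin_cons_cons (sep a b : String) (l : List String) :
    PySem.Str.join sep (a :: b :: l) = a ++ sep ++ PySem.Str.join sep (b :: l) := by
  apply str_ext
  simp [PySem.Str.toList_join, PySem.Chars.join_cons_cons, String.toList_append]

set_option maxRecDepth 20000 in
set_option maxHeartbeats 2000000 in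
lemma renderA_core (w1 w2 w3 w4 w5 w6 w7 w8 w9 : String)
    (h1 : NB w1.toList = true) (h2 : NB w2.toList = true) (h3 : NB w3.toList = true)
    (h4 : NB w4.toList = true) (h5 : NB w5.toList = true) (h6 : NB w6.toList = true)
    (h7 : NB w7.toList = true) (h8 : NB w8.toList = true) (h9 : NB w9.toList = true) :
    List.foldl (fun out kv => PySem.Str.replace out ("{" ++ kv.1 ++ "}") kv.2) NAV_TEMPLATE
      [("ACTIVE_signals", w1), ("ACTIVE_signals_feed", w2), ("ACTIVE_scanner", w3), ("ACTIVE_chart", w4), ("ACTIVE_track", w5), ("ACTIVE_watchlist", w6), ("ACTIVE_providers", w7), ("ACTIVE_pricing", w8), ("ACTIVE_help", w9)] =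
      ("<nav>\n    <a href=\"signals.html\"" ++ (w1 ++ (">Signals</a>\n    <a href=\"signals-feed.html\"" ++ (w2 ++ (">Feed</a>\n    <a href=\"scanner.html\"" ++ (w3 ++ (">Scanner</a>\n    <a href=\"chart.html\"" ++ (w4 ++ (">Chart</a>\n    <a href=\"track.html\"" ++ (w5 ++ (">Track</a>\n    <a href=\"watchlist.html\"" ++ (w6 ++ (">Watchlist</a>\n    <a href=\"providers.html\"" ++ (w7 ++ (">Providers</a>\n    <a href=\"https://signals.agoraiq.net\">Calls</a>\n    <a href=\"pricing.html\"" ++ (w8 ++ (">Pricing</a>\n    <a href=\"help.html\"" ++ (w9 ++ (">Help</a>\n    <a href=\"#\" onclick=\"localStorage.removeItem('iq_token');window.location.href='/login.html'\" style=\"color:var(--red)\">Sign Out</a>\n  </nav>" ++ ""))))))))))))))))))) := by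
  rw [foldl_pairs]
  rw [show NAV_TEMPLATE = rendS [(false, "<nav>\n    <a href=\"signals.html\""),
      (true, "{ACTIVE_signals}"),
      (false, ">Signals</a>\n    <a href=\"signals-feed.html\""),
      (true, "{ACTIVE_signals_feed}"),
      (false, ">Feed</a>\n    <a href=\"scanner.html\""),
      (true, "{ACTIVE_scanner}"),
      (false, ">Scanner</a>\n    <a href=\"chart.html\""),
      (true, "{ACTIVE_chart}"),
      (false, ">Chart</a>\n    <a href=\"track.html\""),
      (true, "{ACTIVE_track}"),
      (false, ">Track</a>\n    <a href=\"watchlist.html\""),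
      (true, "{ACTIVE_watchlist}"),
      (false, ">Watchlist</a>\n    <a href=\"providers.html\""),
      (true, "{ACTIVE_providers}"),
      (false, ">Providers</a>\n    <a href=\"https://signals.agoraiq.net\">Calls</a>\n    <a href=\"pricing.html\""),
      (true, "{ACTIVE_pricing}"),
      (false, ">Pricing</a>\n    <a href=\"help.html\""),
      (true, "{ACTIVE_help}"),
      (false, ">Help</a>\n    <a href=\"#\" onclick=\"localStorage.removeItem('iq_token');window.location.href='/login.html'\" style=\"color:var(--red)\">Sign Out</a>\n  </nav>")] from by simp [rendS, NAV_TEMPLATE]]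
  rw [multi_replace _ _ ?_ ?_]
  · simp [msub, substL, rendS]
  · intro p hp
    fin_cases hp <;>
      first
      | exact ⟨⟨"ACTIVE_signals}".toList, by simp⟩, h1⟩
      | exact ⟨⟨"ACTIVE_signals_feed}".toList, by simp⟩, h2⟩
      | exact ⟨⟨"ACTIVE_scanner}".toList, by simp⟩, h3⟩
      | exact ⟨⟨"ACTIVE_chart}".toList, by simp⟩, h4⟩
      | exact ⟨⟨"ACTIVE_track}".toList, by simp⟩, h5⟩
      | exact ⟨⟨"ACTIVE_watchlist}".toList, by simp⟩, h6⟩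
      | exact ⟨⟨"ACTIVE_providers}".toList, by simp⟩, h7⟩
      | exact ⟨⟨"ACTIVE_pricing}".toList, by simp⟩, h8⟩
      | exact ⟨⟨"ACTIVE_help}".toList, by simp⟩, h9⟩
  · intro s hs
    fin_cases hs <;> simp [segOKP, NB] <;> decide

lemma activeMap_items : ACTIVE_MAP.items =
  [("signals.html", "signals"), ("signals-mobile.html", "signals"),
   ("signals-feed.html", "signals_feed"), ("scanner.html", "scanner"),
   ("scanner-mobile.html", "scanner"), ("chart.html", "chart"),
   ("chart-mobile.html", "chart"), ("track.html", "track"),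
   ("track-mobile.html", "track"), ("watchlist.html", "watchlist"),
   ("providers.html", "providers"), ("pricing.html", "pricing"),
   ("help.html", "help")] := by decide

lemma activeMap_get_cases (fn : String) :
    PySem.Dict.get? ACTIVE_MAP fn ∈ ([none, some "signals", some "signals_feed", some "scanner", some "chart", some "track", some "watchlist", some "providers", some "pricing", some "help"] : List (Option String)) := by
  cases h : PySem.Dict.get? ACTIVE_MAP fn with
  | none => simp
  | some v =>
    have hv := PySem.Dict.mem_items_of_get?_eq_some ACTIVE_MAP h
    rw [activeMap_items] at hv
    simp only [List.mem_cons, List.not_mem_nil, or_false, Prod.mk.injEq] at hv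
    rcases hv with ⟨_, rfl⟩|⟨_, rfl⟩|⟨_, rfl⟩|⟨_, rfl⟩|⟨_, rfl⟩|⟨_, rfl⟩|⟨_, rfl⟩|⟨_, rfl⟩|⟨_, rfl⟩|⟨_, rfl⟩|⟨_, rfl⟩|⟨_, rfl⟩|⟨_, rfl⟩ <;> simp

set_option maxRecDepth 20000 in
lemma renderB_core (active : Option String) :
    renderB active = ("<nav>" ++ ("\n" ++ ("    <a href=\"" ++ ("signals.html" ++ ("\"" ++ ((if some "signals" = active then " class=\"active\"" else "") ++ (">" ++ ("Signals" ++ ("</a>" ++ ("\n" ++ ("    <a href=\"" ++ ("signals-feed.html" ++ ("\"" ++ ((if some "signals_feed" = active then " class=\"active\"" else "") ++ (">" ++ ("Feed" ++ ("</a>" ++ ("\n" ++ ("    <a href=\"" ++ ("scanner.html" ++ ("\"" ++ ((if some "scanner" = active then " class=\"active\"" else "") ++ (">" ++ ("Scanner" ++ ("</a>" ++ ("\n" ++ ("    <a href=\"" ++ ("chart.html" ++ ("\"" ++ ((if some "chart" = active then " class=\"active\"" else "") ++ (">" ++ ("Chart" ++ ("</a>" ++ ("\n" ++ ("    <a href=\""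 ++ ("track.html" ++ ("\"" ++ ((if some "track" = active then " class=\"active\"" else "") ++ (">" ++ ("Track" ++ ("</a>" ++ ("\n" ++ ("    <a href=\"" ++ ("watchlist.html" ++ ("\"" ++ ((if some "watchlist" = active then " class=\"active\"" else "") ++ (">" ++ ("Watchlist" ++ ("</a>" ++ ("\n" ++ ("    <a href=\"" ++ ("providers.html" ++ ("\"" ++ ((if some "providers" = active then " class=\"active\"" else "") ++ (">" ++ ("Providers" ++ ("</a>" ++ ("\n" ++ ("    <a href=\"" ++ ("https://signals.agoraiq.net" ++ ("\"" ++ (">" ++ ("Calls" ++ ("</a>" ++ ("\n" ++ ("    <a href=\"" ++ ("pricing.html" ++ ("\"" ++ ((if some "pricing" = active then " class=\"active\"" else "") ++ (">" ++ ("Pricing" ++ ("</a>" ++ ("\n" ++ ("    <a href=\"" ++ ("help.html" ++ ("\"" ++ ((if some "help" = active then " class=\"active\"" else "") ++ (">" ++ ("Help" ++ ("</a>" ++ ("\n" ++ (SIGNOUT_LINE ++ ("\n" ++ "  </nav>"))))))))))))))))))))))))))))))))))))))))))))))))))))))))))))))))))))))))))))))))))) := by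
  simp only [renderB, NAV_ENTRIES, List.foldl_cons, List.foldl_nil, List.cons_append,
    List.nil_append, List.append_assoc, List.singleton_append, sjoin_cons_cons, sjoin_singleton,
    Option.isSome_some, Option.isSome_none, true_and, false_and, if_false, Bool.false_eq_true,
    String.empty_append, String.append_assoc]

set_option maxRecDepth 40000 in
set_option maxHeartbeats 2000000 in
lemma chain_eq (w1 w2 w3 w4 w5 w6 w7 w8 w9 : String) :
    ("<nav>\n    <a href=\"signals.html\"" ++ (w1 ++ (">Signals</a>\n    <a href=\"signals-feed.html\"" ++ (w2 ++ (">Feed</a>\n    <a href=\"scanner.html\"" ++ (w3 ++ (">Scanner</a>\n    <a href=\"chart.html\"" ++ (w4 ++ (">Chart</a>\n    <a href=\"track.html\"" ++ (w5 ++ (">Track</a>\n    <a href=\"watchlist.html\"" ++ (w6 ++ (">Watchlist</a>\n    <a href=\"providers.html\"" ++ (w7 ++ (">Providers</a>\n    <a href=\"https://signals.agoraiq.net\">Calls</a>\n    <a href=\"pricing.html\"" ++ (w8 ++ (">Pricing</a>\n    <a href=\"help.html\"" ++ (w9 ++ (">Help</a>\n    <a href=\"#\" onclick=\"localStorage.removeItem('iq_token');window.location.href='/login.html'\"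 style=\"color:var(--red)\">Sign Out</a>\n  </nav>" ++ ""))))))))))))))))))) = ("<nav>" ++ ("\n" ++ ("    <a href=\"" ++ ("signals.html" ++ ("\"" ++ (w1 ++ (">" ++ ("Signals" ++ ("</a>" ++ ("\n" ++ ("    <a href=\"" ++ ("signals-feed.html" ++ ("\"" ++ (w2 ++ (">" ++ ("Feed" ++ ("</a>" ++ ("\n" ++ ("    <a href=\"" ++ ("scanner.html" ++ ("\"" ++ (w3 ++ (">" ++ ("Scanner" ++ ("</a>" ++ ("\n" ++ ("    <a href=\"" ++ ("chart.html" ++ ("\"" ++ (w4 ++ (">" ++ ("Chart" ++ ("</a>" ++ ("\n" ++ ("    <a href=\"" ++ ("track.html" ++ ("\"" ++ (w5 ++ (">" ++ ("Track" ++ ("</a>" ++ ("\n" ++ ("    <a href=\"" ++ ("watchlist.html" ++ ("\"" ++ (w6 ++ (">" ++ ("Watchlist" ++ ("</a>" ++ ("\n" ++ ("    <a href=\"" ++ ("providers.html" ++ ("\"" ++ (w7 ++ (">" ++ ("Providers" ++ ("</a>" ++ ("\n" ++ ("    <a href=\"" ++ ("https://signals.agoraiq.net" ++ ("\"" ++ (">"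 ++ ("Calls" ++ ("</a>" ++ ("\n" ++ ("    <a href=\"" ++ ("pricing.html" ++ ("\"" ++ (w8 ++ (">" ++ ("Pricing" ++ ("</a>" ++ ("\n" ++ ("    <a href=\"" ++ ("help.html" ++ ("\"" ++ (w9 ++ (">" ++ ("Help" ++ ("</a>" ++ ("\n" ++ (SIGNOUT_LINE ++ ("\n" ++ "  </nav>"))))))))))))))))))))))))))))))))))))))))))))))))))))))))))))))))))))))))))))))))))) := by
  apply str_ext
  simp [String.toList_append, SIGNOUT_LINE]

lemma items_0 : (renderA_sub none).items = [("ACTIVE_signals", ""), ("ACTIVE_signals_feed", ""), ("ACTIVE_scanner", ""), ("ACTIVE_chart", ""), ("ACTIVE_track", ""), ("ACTIVE_watchlist", ""), ("ACTIVE_providers", ""), ("ACTIVE_pricing", ""), ("ACTIVE_help", "")] := by decide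

set_option maxRecDepth 20000 in
lemma case_0 : renderA none = renderB none := by
  rw [renderB_core, if_neg (by decide), if_neg (by decide), if_neg (by decide), if_neg (by decide), if_neg (by decide), if_neg (by decide), if_neg (by decide), if_neg (by decide), if_neg (by decide)]
  unfold renderA
  rw [items_0, renderA_core "" "" "" "" "" "" "" "" "" (by decide) (by decide) (by decide) (by decide) (by decide) (by decide) (by decide) (by decide) (by decide)]
  rw [chain_eq]

lemma items_1 : (renderA_sub (some "signals")).items = [("ACTIVE_signals", " class=\"active\""), ("ACTIVE_signals_feed", ""), ("ACTIVE_scanner", ""), ("ACTIVE_chart", ""), ("ACTIVE_track", ""), ("ACTIVE_watchlist", ""), ("ACTIVE_providers", ""), ("ACTIVE_pricing", ""), ("ACTIVE_help", "")] := by decide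

set_option maxRecDepth 20000 in
lemma case_1 : renderA (some "signals") = renderB (some "signals") := by
  rw [renderB_core, if_pos (by decide), if_neg (by decide), if_neg (by decide), if_neg (by decide), if_neg (by decide), if_neg (by decide), if_neg (by decide), if_neg (by decide), if_neg (by decide)]
  unfold renderA
  rw [items_1, renderA_core " class=\"active\"" "" "" "" "" "" "" "" "" (by decide) (by decide) (by decide) (by decide) (by decide) (by decide) (by decide) (by decide) (by decide)]
  rw [chain_eq]

lemma items_2 : (renderA_sub (some "signals_feed")).items = [("ACTIVE_signals", ""), ("ACTIVE_signals_feed", " class=\"active\""), ("ACTIVE_scanner", ""), ("ACTIVE_chart", ""), ("ACTIVE_track", ""), ("ACTIVE_watchlist", ""), ("ACTIVE_providers", ""), ("ACTIVE_pricing", ""), ("ACTIVE_help", "")] := by decide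

set_option maxRecDepth 20000 in
lemma case_2 : renderA (some "signals_feed") = renderB (some "signals_feed") := by
  rw [renderB_core, if_neg (by decide), if_pos (by decide), if_neg (by decide), if_neg (by decide), if_neg (by decide), if_neg (by decide), if_neg (by decide), if_neg (by decide), if_neg (by decide)]
  unfold renderA
  rw [items_2, renderA_core "" " class=\"active\"" "" "" "" "" "" "" "" (by decide) (by decide) (by decide) (by decide) (by decide) (by decide) (by decide) (by decide) (by decide)]
  rw [chain_eq]

lemma items_3 : (renderA_sub (some "scanner")).items = [("ACTIVE_signals", ""), ("ACTIVE_signals_feed", ""), ("ACTIVE_scanner", " class=\"active\""), ("ACTIVE_chart", ""), ("ACTIVE_track", ""), ("ACTIVE_watchlist", ""), ("ACTIVE_providers", ""), ("ACTIVE_pricing", ""), ("ACTIVE_help", "")] := by decide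

set_option maxRecDepth 20000 in
lemma case_3 : renderA (some "scanner") = renderB (some "scanner") := by
  rw [renderB_core, if_neg (by decide), if_neg (by decide), if_pos (by decide), if_neg (by decide), if_neg (by decide), if_neg (by decide), if_neg (by decide), if_neg (by decide), if_neg (by decide)]
  unfold renderA
  rw [items_3, renderA_core "" "" " class=\"active\"" "" "" "" "" "" "" (by decide) (by decide) (by decide) (by decide) (by decide) (by decide) (by decide) (by decide) (by decide)]
  rw [chain_eq]

lemma items_4 : (renderA_sub (some "chart")).items = [("ACTIVE_signals", ""), ("ACTIVE_signals_feed", ""), ("ACTIVE_scanner", ""), ("ACTIVE_chart", " class=\"active\""), ("ACTIVE_track", ""), ("ACTIVE_watchlist", ""), ("ACTIVE_providers", ""), ("ACTIVE_pricing", ""), ("ACTIVE_help", "")] := by decide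

set_option maxRecDepth 20000 in
lemma case_4 : renderA (some "chart") = renderB (some "chart") := by
  rw [renderB_core, if_neg (by decide), if_neg (by decide), if_neg (by decide), if_pos (by decide), if_neg (by decide), if_neg (by decide), if_neg (by decide), if_neg (by decide), if_neg (by decide)]
  unfold renderA
  rw [items_4, renderA_core "" "" "" " class=\"active\"" "" "" "" "" "" (by decide) (by decide) (by decide) (by decide) (by decide) (by decide) (by decide) (by decide) (by decide)]
  rw [chain_eq]

lemma items_5 : (renderA_sub (some "track")).items = [("ACTIVE_signals", ""), ("ACTIVE_signals_feed", ""), ("ACTIVE_scanner", ""), ("ACTIVE_chart", ""), ("ACTIVE_track", " class=\"active\""), ("ACTIVE_watchlist", ""), ("ACTIVE_providers", ""), ("ACTIVE_pricing", ""), ("ACTIVE_help", "")] := by decide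

set_option maxRecDepth 20000 in
lemma case_5 : renderA (some "track") = renderB (some "track") := by
  rw [renderB_core, if_neg (by decide), if_neg (by decide), if_neg (by decide), if_neg (by decide), if_pos (by decide), if_neg (by decide), if_neg (by decide), if_neg (by decide), if_neg (by decide)]
  unfold renderA
  rw [items_5, renderA_core "" "" "" "" " class=\"active\"" "" "" "" "" (by decide) (by decide) (by decide) (by decide) (by decide) (by decide) (by decide) (by decide) (by decide)]
  rw [chain_eq]

lemma items_6 : (renderA_sub (some "watchlist")).items = [("ACTIVE_signals", ""), ("ACTIVE_signals_feed", ""), ("ACTIVE_scanner", ""), ("ACTIVE_chart", ""), ("ACTIVE_track", ""), ("ACTIVE_watchlist", " class=\"active\""), ("ACTIVE_providers", ""), ("ACTIVE_pricing", ""), ("ACTIVE_help", "")] := by decide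

set_option maxRecDepth 20000 in
lemma case_6 : renderA (some "watchlist") = renderB (some "watchlist") := by
  rw [renderB_core, if_neg (by decide), if_neg (by decide), if_neg (by decide), if_neg (by decide), if_neg (by decide), if_pos (by decide), if_neg (by decide), if_neg (by decide), if_neg (by decide)]
  unfold renderA
  rw [items_6, renderA_core "" "" "" "" "" " class=\"active\"" "" "" "" (by decide) (by decide) (by decide) (by decide) (by decide) (by decide) (by decide) (by decide) (by decide)]
  rw [chain_eq]

lemma items_7 : (renderA_sub (some "providers")).items = [("ACTIVE_signals", ""), ("ACTIVE_signals_feed", ""), ("ACTIVE_scanner", ""), ("ACTIVE_chart", ""), ("ACTIVE_track", ""), ("ACTIVE_watchlist", ""), ("ACTIVE_providers", " class=\"active\""), ("ACTIVE_pricing", ""), ("ACTIVE_help", "")] := by decide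

set_option maxRecDepth 20000 in
lemma case_7 : renderA (some "providers") = renderB (some "providers") := by
  rw [renderB_core, if_neg (by decide), if_neg (by decide), if_neg (by decide), if_neg (by decide), if_neg (by decide), if_neg (by decide), if_pos (by decide), if_neg (by decide), if_neg (by decide)]
  unfold renderA
  rw [items_7, renderA_core "" "" "" "" "" "" " class=\"active\"" "" "" (by decide) (by decide) (by decide) (by decide) (by decide) (by decide) (by decide) (by decide) (by decide)]
  rw [chain_eq]

lemma items_8 : (renderA_sub (some "pricing")).items = [("ACTIVE_signals", ""), ("ACTIVE_signals_feed", ""), ("ACTIVE_scanner", ""), ("ACTIVE_chart", ""), ("ACTIVE_track", ""), ("ACTIVE_watchlist", ""), ("ACTIVE_providers", ""), ("ACTIVE_pricing", " class=\"active\""), ("ACTIVE_help", "")] := by decide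

set_option maxRecDepth 20000 in
lemma case_8 : renderA (some "pricing") = renderB (some "pricing") := by
  rw [renderB_core, if_neg (by decide), if_neg (by decide), if_neg (by decide), if_neg (by decide), if_neg (by decide), if_neg (by decide), if_neg (by decide), if_pos (by decide), if_neg (by decide)]
  unfold renderA
  rw [items_8, renderA_core "" "" "" "" "" "" "" " class=\"active\"" "" (by decide) (by decide) (by decide) (by decide) (by decide) (by decide) (by decide) (by decide) (by decide)]
  rw [chain_eq]

lemma items_9 : (renderA_sub (some "help")).items = [("ACTIVE_signals", ""), ("ACTIVE_signals_feed", ""), ("ACTIVE_scanner", ""), ("ACTIVE_chart", ""), ("ACTIVE_track", ""), ("ACTIVE_watchlist", ""), ("ACTIVE_providers", ""), ("ACTIVE_pricing", ""), ("ACTIVE_help", " class=\"active\"")] := by decide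

set_option maxRecDepth 20000 in
lemma case_9 : renderA (some "help") = renderB (some "help") := by
  rw [renderB_core, if_neg (by decide), if_neg (by decide), if_neg (by decide), if_neg (by decide), if_neg (by decide), if_neg (by decide), if_neg (by decide), if_neg (by decide), if_pos (by decide)]
  unfold renderA
  rw [items_9, renderA_core "" "" "" "" "" "" "" "" " class=\"active\"" (by decide) (by decide) (by decide) (by decide) (by decide) (by decide) (by decide) (by decide) (by decide)]
  rw [chain_eq]

-- ===== VERDICT (by name: the statement is the Claim_ definition above) =====
theorem render_nav_spec : Claim_equal_render_nav := by
  intro fn _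
  unfold Spec_render_nav render_nav render_nav_alt
  have h := activeMap_get_cases fn
  simp only [List.mem_cons, List.not_mem_nil, or_false] at h
  rcases h with h|h|h|h|h|h|h|h|h|h <;> rw [h]
  · exact case_0
  · exact case_1
  · exact case_2
  · exact case_3
  · exact case_4
  · exact case_5
  · exact case_6
  · exact case_7
  · exact case_8
  · exact case_9
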